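-- pv_equiv track=rewrite | github.com/buddhastech/python_poo_practice | exceptions/exceptions.py | validar_apellidos
-- ===== SOURCE A (Python) =====
-- def validar_apellidos(apellidos):
--
--     numeros_caracterest = ['0','1','2','3','4','5','6','7','8','9']
--
--     response = False
--
--     for caracter in apellidos:
--         if caracter in numeros_caracterest:
--             return False
--         else:
--             response = True
--
--     return response
-- ===== SOURCE B (Python) =====
-- def validar_apellidos(apellidos):
--     if not apellidos:
--         return False
--     for d in '0123456789':
--         if d in apellidos:
--             return False
--     return True
-- ===== Notes on version B (the rewrite author's own statement) =====
-- stated objective: alternative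
-- what changed: Inverted the traversal: instead of one pass over the surname's characters testing each against a digit list with an early return and a flag, B guards the empty case and loops over the ten digit characters, doing a substring membership test `d in apellidos` for each.
import Mathlib
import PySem

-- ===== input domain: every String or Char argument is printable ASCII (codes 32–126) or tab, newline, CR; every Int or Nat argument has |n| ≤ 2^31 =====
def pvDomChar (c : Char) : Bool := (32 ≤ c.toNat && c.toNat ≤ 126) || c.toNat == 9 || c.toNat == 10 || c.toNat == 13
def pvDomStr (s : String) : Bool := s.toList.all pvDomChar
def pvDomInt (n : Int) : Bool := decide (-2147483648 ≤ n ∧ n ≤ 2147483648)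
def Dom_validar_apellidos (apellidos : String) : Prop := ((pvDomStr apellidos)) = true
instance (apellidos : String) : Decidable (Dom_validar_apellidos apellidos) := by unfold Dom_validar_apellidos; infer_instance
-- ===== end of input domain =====

-- B inverts the traversal: an emptiness guard, then a loop over the ten digit
-- characters testing `d in apellidos` (substring membership) for each, instead of
-- A's single pass over the surname's characters with a flag and an early return.

-- ===== PORT A =====
-- the literal list numeros_caracterest
def pvDigitsA : List Char := ['0','1','2','3','4','5','6','7','8','9']

-- A's for-loop over the characters, carrying `response`; early `return False` on a digit
def pvLoopA : List Char → Bool → Bool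
  | [], response => response
  | c :: cs, _ => if c ∈ pvDigitsA then false else pvLoopA cs true

def validar_apellidos (apellidos : String) : Bool :=
  pvLoopA apellidos.toList false

-- ===== PORT B =====
-- B's for-loop over the digit string; early `return False` when the digit occurs in the surname
def pvLoopB (chars : List Char) : List Char → Bool
  | [] => true
  | d :: ds => if PySem.Chars.isIn [d] chars then false else pvLoopB chars ds

def validar_apellidos_alt (apellidos : String) : Bool :=
  if apellidos = "" then false
  else pvLoopB apellidos.toList "0123456789".toList

-- ===== PRECONDITION & SPEC =====
def Spec_validar_apellidos (apellidos : String) (out : Bool) : Prop := out = validar_apellidos_alt apellidos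
instance (apellidos : String) (out : Bool) : Decidable (Spec_validar_apellidos apellidos out) := by unfold Spec_validar_apellidos; infer_instance

-- ===== CLAIM (what is proved, stated in full; the proofs are below) =====
def Claim_equal_validar_apellidos : Prop := ∀ (apellidos : String), Dom_validar_apellidos apellidos → Spec_validar_apellidos apellidos (validar_apellidos apellidos)

-- ===== LEMMAS AND PROOFS =====

-- a singleton is an infix iff its element is a member
theorem singleton_infix_iff_mem (c : Char) (l : List Char) : [c] <:+: l ↔ c ∈ l := by
  constructor
  · intro h; exact h.subset (List.mem_singleton_self c)
  · intro h
    obtain ⟨pre, suf, rfl⟩ := List.append_of_mem h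
    exact ⟨pre, suf, by simp⟩

-- B's loop answers "no digit of ds occurs in chars"
theorem pvLoopB_eq (chars ds : List Char) :
    pvLoopB chars ds = !ds.any (fun d => d ∈ chars) := by
  induction ds with
  | nil => rfl
  | cons d ds ih =>
      simp only [pvLoopB, List.any_cons]
      by_cases h : d ∈ chars
      · have : PySem.Chars.isIn [d] chars = true :=
          (PySem.Chars.isIn_iff_infix _ _).mpr ((singleton_infix_iff_mem d chars).mpr h)
        simp [this, h]
      · have : PySem.Chars.isIn [d] chars = false :=
          (PySem.Chars.isIn_eq_false_iff _ _).mpr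
            (fun hinf => h ((singleton_infix_iff_mem d chars).mp hinf))
        simp [this, h, ih]

-- once `response` is true, A's loop answers "no digit in the rest"
theorem pvLoopA_true (l : List Char) :
    pvLoopA l true = !l.any (fun c => c ∈ pvDigitsA) := by
  induction l with
  | nil => rfl
  | cons c cs ih =>
      simp only [pvLoopA, List.any_cons]
      by_cases h : c ∈ pvDigitsA <;> simp [h, ih]

-- the two scan orders agree: some character of chars is a digit iff some digit occurs in chars
theorem any_swap (chars ds : List Char) :
    chars.any (fun c => c ∈ ds) = ds.any (fun d => d ∈ chars) := by
  rw [Bool.eq_iff_iff]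
  simp only [List.any_eq_true, decide_eq_true_eq]
  exact ⟨fun ⟨x, h1, h2⟩ => ⟨x, h2, h1⟩, fun ⟨x, h1, h2⟩ => ⟨x, h2, h1⟩⟩

-- ===== VERDICT (by name: the statement is the Claim_ definition above) =====
theorem validar_apellidos_spec : Claim_equal_validar_apellidos := by
  intro s _
  unfold Spec_validar_apellidos validar_apellidos validar_apellidos_alt
  by_cases hs : s = ""
  · subst hs; rfl
  · have htl : s.toList ≠ [] := by
      intro h; exact hs (by simpa using congrArg String.ofList h)
    have hds : "0123456789".toList = pvDigitsA := by decide
    rw [pvLoopB_eq, ← any_swap, hds, if_neg hs]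
    cases hl : s.toList with
    | nil => exact absurd hl htl
    | cons c cs =>
        simp only [pvLoopA, List.any_cons]
        by_cases h : c ∈ pvDigitsA
        · rw [if_pos h]
          simp [h]
        · rw [if_neg h, pvLoopA_true]
          simp [h]
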